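-- pv_equiv track=rewrite | github.com/Xpp-roc/DRAM | src/data.py | construct_fact_dict
-- ===== SOURCE A (Python) =====
-- def construct_fact_dict(fact_rdf):
--     fact_dict = {}
--     for rdf in fact_rdf:
--         fact = parse_rdf(rdf)
--         h, r, t = fact
--         if r not in fact_dict:
--             fact_dict[r] = []
--         fact_dict[r].append(rdf)
--
--     return fact_dict
--
-- def parse_rdf(rdf):
--     """
--         return: head, relation, tail
--     """
--     rdf_tail, rdf_rel, rdf_head= rdf
--     return rdf_head, rdf_rel, rdf_tail
-- ===== SOURCE B (Python) =====
-- def construct_fact_dict(fact_rdf):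
--     # Two-pass decomposition: first collect the distinct relations in order of
--     # first appearance, then build each group by filtering the whole list.
--     seen = []
--     for rdf in fact_rdf:
--         r = rdf[1]
--         if r not in seen:
--             seen.append(r)
--     return {r: [rdf for rdf in fact_rdf if rdf[1] == r] for r in seen}
-- ===== Notes on version B (the rewrite author's own statement) =====
-- stated objective: alternative
-- what changed: Replaces the single-pass dict accumulation (conditional key creation + in-place append) by a two-pass decomposition: one pass collecting distinct relations in first-appearance order, then a dict comprehension building each group by filtering the input list.
import Mathlib
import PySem

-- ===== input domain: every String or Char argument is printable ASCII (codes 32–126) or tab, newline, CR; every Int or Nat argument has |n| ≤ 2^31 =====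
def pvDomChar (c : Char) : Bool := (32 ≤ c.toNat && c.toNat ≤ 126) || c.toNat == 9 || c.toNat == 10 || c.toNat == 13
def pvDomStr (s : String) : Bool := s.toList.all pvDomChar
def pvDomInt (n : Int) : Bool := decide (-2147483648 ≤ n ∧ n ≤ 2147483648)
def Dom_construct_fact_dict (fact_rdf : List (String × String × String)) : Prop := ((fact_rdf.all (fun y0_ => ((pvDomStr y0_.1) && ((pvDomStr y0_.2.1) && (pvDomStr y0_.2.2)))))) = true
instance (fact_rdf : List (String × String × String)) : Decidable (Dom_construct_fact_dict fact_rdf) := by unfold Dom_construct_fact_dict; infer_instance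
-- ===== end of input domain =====

-- B replaces A's single-pass dict accumulation by a two-pass scheme (collect distinct
-- relations in first-appearance order, then filter the list per relation); alternative
-- decomposition of the same cost class, return values proved equal.


-- ===== PORT A =====
def parse_rdf (rdf : String × String × String) : String × String × String :=
  (rdf.2.2, rdf.2.1, rdf.1)

def construct_fact_dict (fact_rdf : List (String × String × String)) : List (String × List (String × String × String)) :=
  let fact_dict : PySem.Dict String (List (String × String × String)) :=
    fact_rdf.foldl (fun d rdf =>
      let fact := parse_rdf rdf
      let r := fact.2.1
      let d := if d.contains r then d else d.insert r []
      d.modify r [] (· ++ [rdf])) PySem.Dict.empty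
  fact_dict.items

-- ===== PORT B =====
def construct_fact_dict_alt (fact_rdf : List (String × String × String)) : List (String × List (String × String × String)) :=
  let seen : List String :=
    fact_rdf.foldl (fun s rdf => if s.contains rdf.2.1 then s else s ++ [rdf.2.1]) []
  seen.map (fun r => (r, fact_rdf.filter (fun rdf => rdf.2.1 == r)))

-- ===== PRECONDITION & SPEC =====
def Spec_construct_fact_dict (fact_rdf : List (String × String × String)) (out : List (String × List (String × String × String))) : Prop := out = construct_fact_dict_alt fact_rdf
instance (fact_rdf : List (String × String × String)) (out : List (String × List (String × String × String))) : Decidable (Spec_construct_fact_dict fact_rdf out) := by unfold Spec_construct_fact_dict; infer_instance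

-- ===== CLAIM (what is proved, stated in full; the proofs are below) =====
def Claim_equal_construct_fact_dict : Prop := ∀ (fact_rdf : List (String × String × String)), Dom_construct_fact_dict fact_rdf → Spec_construct_fact_dict fact_rdf (construct_fact_dict fact_rdf)

-- ===== LEMMAS AND PROOFS =====

-- A's loop body (conditional key creation + append) is exactly one `modify`.
theorem step_eq_modify (d : PySem.Dict String (List (String × String × String)))
    (rdf : String × String × String) :
    (if d.contains rdf.2.1 then d else d.insert rdf.2.1 []).modify rdf.2.1 [] (· ++ [rdf])
      = d.modify rdf.2.1 [] (· ++ [rdf]) := by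
  by_cases h : d.contains rdf.2.1
  · simp [h]
  · simp only [h, if_false, Bool.false_eq_true]
    simp only [PySem.Dict.modify]
    rw [PySem.Dict.getD_insert_self, PySem.Dict.insert_insert_self,
        PySem.Dict.getD_of_not_contains _ _ (by simpa using h)]

-- value of the grouping fold at any key
theorem getD_group (l : List (String × String × String))
    (d : PySem.Dict String (List (String × String × String))) (c : String) :
    (l.foldl (fun d x => d.modify x.2.1 [] (· ++ [x])) d).getD c []
      = d.getD c [] ++ l.filter (fun x => x.2.1 == c) := by
  induction l generalizing d with
  | nil => simp
  | cons x xs ih =>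
    simp only [List.foldl_cons, ih, List.filter_cons]
    rw [PySem.Dict.getD_modify]
    by_cases h : x.2.1 = c
    · simp [h]
    · simp [h, Ne.symm h]

theorem construct_fact_dict_eq (l : List (String × String × String)) :
    construct_fact_dict l
      = (PySem.Set.ofList (l.map (·.2.1))).map
          (fun r => (r, l.filter (fun x => x.2.1 == r))) := by
  unfold construct_fact_dict
  have hstep : (fun (d : PySem.Dict String (List (String × String × String))) rdf =>
      let fact := parse_rdf rdf
      let r := fact.2.1
      let d := if d.contains r then d else d.insert r []
      d.modify r [] (· ++ [rdf]))
      = (fun d x => d.modify x.2.1 [] (· ++ [x])) := by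
    funext d rdf
    simpa [parse_rdf] using step_eq_modify d rdf
  simp only [hstep]
  have hnd : (l.foldl (fun d x => d.modify x.2.1 [] (· ++ [x])) PySem.Dict.empty).keys.Nodup := by
    exact PySem.Dict.nodup_keys_foldl_modify_key l (·.2.1) [] (fun _ x v => v ++ [x])
      PySem.Dict.empty (by simp [PySem.Dict.keys_empty])
  rw [PySem.Dict.items_eq_map_keys _ hnd []]
  rw [PySem.Dict.keys_foldl_modify_key l (·.2.1) [] (fun _ x v => v ++ [x]) PySem.Dict.empty]
  rw [show (PySem.Dict.empty : PySem.Dict String (List (String × String × String))).keys = []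
    from PySem.Dict.keys_empty, PySem.Set.update_nil_left]
  refine List.map_congr_left (fun r _ => ?_)
  rw [getD_group]
  simp [PySem.Dict.getD_empty]

theorem construct_fact_dict_alt_eq (l : List (String × String × String)) :
    construct_fact_dict_alt l
      = (PySem.Set.ofList (l.map (·.2.1))).map
          (fun r => (r, l.filter (fun x => x.2.1 == r))) := by
  unfold construct_fact_dict_alt
  have : (l.foldl (fun s rdf => if s.contains rdf.2.1 then s else s ++ [rdf.2.1]) [])
      = PySem.Set.ofList (l.map (·.2.1)) := by
    rw [← PySem.Set.update_nil_left, PySem.Set.update_map_eq_foldl_add]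
    rfl
  rw [this]

-- ===== VERDICT (by name: the statement is the Claim_ definition above) =====
theorem construct_fact_dict_spec : Claim_equal_construct_fact_dict := by
  intro l _
  unfold Spec_construct_fact_dict
  rw [construct_fact_dict_eq, construct_fact_dict_alt_eq]
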